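-- pv_equiv track=rewrite | github.com/lly11-01/aoc-23 | day01.py | convert_to_digit
-- ===== SOURCE A (Python) =====
-- def parse_first_digit(num):
--     digit_strs = {'one': '1', 'two': '2', 'three': '3',
--                   'four': '4', 'five': '5', 'six': '6',
--                   'seven': '7', 'eight': '8', 'nine': '9'}
--     occurrences = {index: digit for digit in reversed(digit_strs) if (index := num.find(digit)) > -1}
--     return digit_strs.get(occurrences.get(0, None), None)
--
-- def convert_to_digit(num):
--     digits = []
--     for i, char in enumerate(num):
--         if char.isdigit():
--             digits.append(char)
--             continue
--         digit = parse_first_digit(num[i:])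
--         if digit is None:
--             continue
--         digits.append(digit)
--     return ''.join(digits)
-- ===== SOURCE B (Python) =====
-- def convert_to_digit(num):
--     words = [('one', '1'), ('two', '2'), ('three', '3'), ('four', '4'), ('five', '5'),
--              ('six', '6'), ('seven', '7'), ('eight', '8'), ('nine', '9')]
--     events = []
--     for word, digit in words:
--         start = 0
--         while True:
--             idx = num.find(word, start)
--             if idx == -1:
--                 break
--             events.append((idx, digit))
--             start = idx + 1
--     for i, ch in enumerate(num):
--         if ch.isdigit():
--             events.append((i, ch))
--     events.sort(key=lambda e: e[0])
--     return ''.join(d for _, d in events)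
-- ===== Notes on version B (the rewrite author's own statement) =====
-- stated objective: faster
-- what changed: A scans position by position and, at every non-digit position, rebuilds a dict by running nine substring find()s over the whole remaining suffix; B instead makes one find(word, start) sweep per word to collect all (overlapping) occurrence indices, one pass for digit characters, then sorts the collected (index, digit) pairs and joins.
import Mathlib
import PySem

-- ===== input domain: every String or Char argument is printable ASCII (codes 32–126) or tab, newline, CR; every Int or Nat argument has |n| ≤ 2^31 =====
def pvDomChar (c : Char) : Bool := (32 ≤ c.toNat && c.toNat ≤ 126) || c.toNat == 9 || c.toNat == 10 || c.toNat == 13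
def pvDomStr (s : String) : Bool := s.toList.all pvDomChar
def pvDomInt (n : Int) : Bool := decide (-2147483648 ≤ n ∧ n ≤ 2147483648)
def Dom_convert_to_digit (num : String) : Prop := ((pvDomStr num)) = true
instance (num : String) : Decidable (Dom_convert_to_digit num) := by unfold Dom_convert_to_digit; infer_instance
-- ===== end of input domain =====

-- B replaces A's position-by-position prefix scan (which re-runs nine substring `find`s on every
-- suffix) with one pass per word collecting all (overlapping) occurrence indices via find(word, start),
-- plus one pass for digit characters, then a sort by index and a join; objective: faster (constant factor).


-- ===== PORT A =====
-- digit_strs, the module-level dict literal of parse_first_digit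
def digitStrs : PySem.Dict String String :=
  ((((((((PySem.Dict.empty.insert "one" "1").insert "two" "2").insert "three" "3").insert
      "four" "4").insert "five" "5").insert "six" "6").insert "seven" "7").insert
      "eight" "8").insert "nine" "9"

-- occurrences = {index: digit for digit in reversed(digit_strs) if (index := num.find(digit)) > -1}
-- return digit_strs.get(occurrences.get(0, None), None)
def parse_first_digit (num : String) : Option String :=
  let occurrences : PySem.Dict Int String :=
    (digitStrs.keys.reverse).foldl (fun d digit =>
      let index := PySem.Str.find num digit
      if index > -1 then d.insert index digit else d) PySem.Dict.empty
  (occurrences.get? 0).bind (fun w => digitStrs.get? w)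

def convert_to_digit (num : String) : String :=
  let digits : List String :=
    (PySem.List.enumerate num.toList 0).foldl (fun acc p =>
      if PySem.Chars.isdigit p.2 then acc ++ [String.ofList [p.2]]
      else
        match parse_first_digit (PySem.Str.slice num (some p.1) none) with
        | none => acc
        | some digit => acc ++ [digit]) []
  PySem.Str.join "" digits

-- ===== PORT B =====
def wordList : List (String × String) :=
  [("one", "1"), ("two", "2"), ("three", "3"), ("four", "4"), ("five", "5"),
   ("six", "6"), ("seven", "7"), ("eight", "8"), ("nine", "9")]

-- the inner `while True: idx = num.find(word, start) …` loop; fuel bounds the iteration count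
-- (each round start strictly increases, so num.length + 1 rounds always suffice)
def findAllFrom (num : String) (word digit : String) : Nat → Nat → List (Int × String)
  | 0, _ => []
  | fuel + 1, start =>
    let idx := PySem.Str.findFrom num word (start : Int) none
    if idx = -1 then []
    else (idx, digit) :: findAllFrom num word digit fuel (idx.toNat + 1)

def convert_to_digit_alt (num : String) : String :=
  let events : List (Int × String) :=
    wordList.foldl (fun acc wd =>
      acc ++ findAllFrom num wd.1 wd.2 (num.toList.length + 1) 0) []
  let events2 : List (Int × String) :=
    (PySem.List.enumerate num.toList 0).foldl (fun acc p =>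
      if PySem.Chars.isdigit p.2 then acc ++ [(p.1, String.ofList [p.2])] else acc) events
  PySem.Str.join "" ((PySem.List.sorted events2 (fun e => e.1) false).map (fun e => e.2))

-- ===== PRECONDITION & SPEC =====
def Spec_convert_to_digit (num : String) (out : String) : Prop := out = convert_to_digit_alt num
instance (num : String) (out : String) : Decidable (Spec_convert_to_digit num out) := by unfold Spec_convert_to_digit; infer_instance

-- ===== CLAIM (what is proved, stated in full; the proofs are below) =====
def Claim_equal_convert_to_digit : Prop := ∀ (num : String), Dom_convert_to_digit num → Spec_convert_to_digit num (convert_to_digit num)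

-- ===== LEMMAS AND PROOFS =====

-- `find s w = 0` means exactly "w is a prefix of s"
lemma find_eq_zero_iff (s w : List Char) : PySem.Chars.find s w = 0 ↔ w <+: s := by
  constructor
  · intro h
    have h0 : (0:Int) ≤ PySem.Chars.find s w := by omega
    have := (PySem.Chars.find_spec h0).1
    rw [h] at this
    simpa using this
  · intro h
    have hne : PySem.Chars.find s w ≠ -1 := by
      rw [PySem.Chars.find_ne_neg_one_iff]
      exact h.isInfix
    have h0 : (0:Int) ≤ PySem.Chars.find s w := by
      have := PySem.Chars.neg_one_le_find s w
      omega
    have hmin := (PySem.Chars.find_spec h0).2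
    by_contra hne0
    have hpos : 0 < (PySem.Chars.find s w).toNat := by omega
    exact hmin 0 hpos (by simpa using h)

-- the dict-comprehension of parse_first_digit, looked up at key 0
lemma dict_loop_get0 (s : String) (ws : List String) (D : PySem.Dict Int String) :
    (ws.foldl (fun d digit =>
      let index := PySem.Str.find s digit
      if index > -1 then d.insert index digit else d) D).get? 0
    = (ws.reverse.find? (fun w => PySem.Str.find s w == 0)).or (D.get? 0) := by
  induction ws generalizing D with
  | nil => simp
  | cons w ws ih =>
    rw [List.foldl_cons, ih]
    have hstep : ((fun d digit =>
        let index := PySem.Str.find s digit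
        if index > -1 then d.insert index digit else d) D w).get? 0
        = (([w].find? (fun w => PySem.Str.find s w == 0)).or (D.get? 0)) := by
      simp only [PySem.Str.find_eq, List.find?_singleton]
      by_cases h0 : PySem.Chars.find s.toList w.toList = 0
      · simp [h0, PySem.Dict.get?_insert_self]
      · have hne : (0:Int) ≠ PySem.Chars.find s.toList w.toList := fun h => h0 h.symm
        by_cases hgt : PySem.Chars.find s.toList w.toList > -1
        · simp [hgt, PySem.Dict.get?_insert_of_ne _ _ hne, h0]
        · simp [hgt, h0]
    rw [hstep, List.reverse_cons, List.find?_append, Option.or_assoc]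

-- parse_first_digit returns the digit of the word that is a prefix of its argument
lemma parse_first_digit_eq (s : String) :
    parse_first_digit s
      = (wordList.find? (fun wd => decide (wd.1.toList <+: s.toList))).map (fun wd => wd.2) := by
  have hkeys : digitStrs.keys.reverse.reverse
      = ["one","two","three","four","five","six","seven","eight","nine"] := by decide
  simp only [parse_first_digit]
  rw [dict_loop_get0, hkeys]
  simp only [PySem.Dict.get?_empty, Option.or_none]
  have hw : ∀ w : String, (PySem.Str.find s w == 0) = decide (w.toList <+: s.toList) := by
    intro w
    rw [Bool.eq_iff_iff]
    simp [PySem.Str.find_eq, beq_iff_eq, decide_eq_true_eq, find_eq_zero_iff]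
  simp only [hw]
  unfold wordList
  by_cases h0 : ("one" : String).toList <+: s.toList
  · rw [List.find?_cons_of_pos (a := "one") (by simpa using h0), List.find?_cons_of_pos (a := ("one", "1")) (by simpa using h0)]
    decide
  · rw [List.find?_cons_of_neg (a := "one") (by simpa using h0), List.find?_cons_of_neg (a := ("one", "1")) (by simpa using h0)]
    by_cases h1 : ("two" : String).toList <+: s.toList
    · rw [List.find?_cons_of_pos (a := "two") (by simpa using h1), List.find?_cons_of_pos (a := ("two", "2")) (by simpa using h1)]
      decide
    · rw [List.find?_cons_of_neg (a := "two") (by simpa using h1), List.find?_cons_of_neg (a := ("two", "2")) (by simpa using h1)]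
      by_cases h2 : ("three" : String).toList <+: s.toList
      · rw [List.find?_cons_of_pos (a := "three") (by simpa using h2), List.find?_cons_of_pos (a := ("three", "3")) (by simpa using h2)]
        decide
      · rw [List.find?_cons_of_neg (a := "three") (by simpa using h2), List.find?_cons_of_neg (a := ("three", "3")) (by simpa using h2)]
        by_cases h3 : ("four" : String).toList <+: s.toList
        · rw [List.find?_cons_of_pos (a := "four") (by simpa using h3), List.find?_cons_of_pos (a := ("four", "4")) (by simpa using h3)]
          decide
        · rw [List.find?_cons_of_neg (a := "four") (by simpa using h3), List.find?_cons_of_neg (a := ("four", "4")) (by simpa using h3)]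
          by_cases h4 : ("five" : String).toList <+: s.toList
          · rw [List.find?_cons_of_pos (a := "five") (by simpa using h4), List.find?_cons_of_pos (a := ("five", "5")) (by simpa using h4)]
            decide
          · rw [List.find?_cons_of_neg (a := "five") (by simpa using h4), List.find?_cons_of_neg (a := ("five", "5")) (by simpa using h4)]
            by_cases h5 : ("six" : String).toList <+: s.toList
            · rw [List.find?_cons_of_pos (a := "six") (by simpa using h5), List.find?_cons_of_pos (a := ("six", "6")) (by simpa using h5)]
              decide
            · rw [List.find?_cons_of_neg (a := "six") (by simpa using h5), List.find?_cons_of_neg (a := ("six", "6")) (by simpa using h5)]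
              by_cases h6 : ("seven" : String).toList <+: s.toList
              · rw [List.find?_cons_of_pos (a := "seven") (by simpa using h6), List.find?_cons_of_pos (a := ("seven", "7")) (by simpa using h6)]
                decide
              · rw [List.find?_cons_of_neg (a := "seven") (by simpa using h6), List.find?_cons_of_neg (a := ("seven", "7")) (by simpa using h6)]
                by_cases h7 : ("eight" : String).toList <+: s.toList
                · rw [List.find?_cons_of_pos (a := "eight") (by simpa using h7), List.find?_cons_of_pos (a := ("eight", "8")) (by simpa using h7)]
                  decide
                · rw [List.find?_cons_of_neg (a := "eight") (by simpa using h7), List.find?_cons_of_neg (a := ("eight", "8")) (by simpa using h7)]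
                  by_cases h8 : ("nine" : String).toList <+: s.toList
                  · rw [List.find?_cons_of_pos (a := "nine") (by simpa using h8), List.find?_cons_of_pos (a := ("nine", "9")) (by simpa using h8)]
                    decide
                  · rw [List.find?_cons_of_neg (a := "nine") (by simpa using h8), List.find?_cons_of_neg (a := ("nine", "9")) (by simpa using h8)]
                    rfl

-- what A appends at position i (as an Option String)
def evS (num : String) (i : Nat) : Option String :=
  if PySem.Chars.isdigit (num.toList[i]?.getD ' ') then some (String.ofList [num.toList[i]?.getD ' '])
  else (wordList.find? (fun wd => decide (wd.1.toList <+: num.toList.drop i))).map (fun wd => wd.2)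

def evP (num : String) (i : Nat) : Option (Int × String) :=
  (evS num i).map (fun t => ((i : Int), t))

lemma A_loop (num : String) : ∀ (m k : Nat) (acc : List String), k + m = num.toList.length →
    (PySem.List.enumerate (num.toList.drop k) (k : Int)).foldl (fun acc p =>
      if PySem.Chars.isdigit p.2 then acc ++ [String.ofList [p.2]]
      else
        match parse_first_digit (PySem.Str.slice num (some p.1) none) with
        | none => acc
        | some digit => acc ++ [digit]) acc
    = acc ++ (List.range' k m).filterMap (evS num) := by
  intro m
  induction m with
  | zero =>
    intro k acc hk
    rw [List.drop_of_length_le (by omega)]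
    simp [PySem.List.enumerate_nil]
  | succ m ih =>
    intro k acc hk
    have hklt : k < num.toList.length := by omega
    rw [List.drop_eq_getElem_cons hklt, PySem.List.enumerate_cons, List.foldl_cons]
    have hcast : (k : Int) + 1 = ((k + 1 : Nat) : Int) := by push_cast; ring
    rw [hcast, ih (k + 1) _ (by omega), List.range'_succ, List.filterMap_cons]
    have hgetD : num.toList[k]?.getD ' ' = num.toList[k] := by
      rw [List.getElem?_eq_getElem hklt]; rfl
    have hslice : (PySem.Str.slice num (some (k : Int)) none).toList = num.toList.drop k := by
      rw [PySem.Str.toList_slice, PySem.Chars.slice_eq_listSlice, PySem.List.slice_from_natCast]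
    by_cases hd : PySem.Chars.isdigit num.toList[k]
    · simp [evS, hgetD, hd]
    · simp only [hd, if_neg, Bool.false_eq_true, not_false_eq_true,
        parse_first_digit_eq, hslice]
      simp only [evS]
      cases hfind : wordList.find? (fun wd => decide (wd.1.toList <+: num.toList.drop k)) with
      | none => simp [hgetD, hd]
      | some wd => simp [hgetD, hd]

lemma A_result (num : String) :
    convert_to_digit num
      = PySem.Str.join "" ((List.range' 0 num.toList.length).filterMap (evS num)) := by
  have h := A_loop num num.toList.length 0 [] (by omega)
  rw [List.drop_zero, Nat.cast_zero, List.nil_append] at h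
  simp only [convert_to_digit]
  rw [h]

-- facts about the literal word table (checked by decide)
lemma word_facts :
    (∀ wd ∈ wordList, wd.1.toList ≠ [] ∧ PySem.Chars.isdigit (wd.1.toList.headD 'x') = false) ∧
    (∀ wd ∈ wordList, ∀ wd' ∈ wordList, wd ≠ wd' → ¬ (wd.1.toList <+: wd'.1.toList)) := by
  decide

-- at most one word of the table is a prefix of a given list
lemma word_unique {t : List Char} {wd wd' : String × String}
    (h : wd ∈ wordList) (h' : wd' ∈ wordList)
    (hp : wd.1.toList <+: t) (hp' : wd'.1.toList <+: t) : wd = wd' := by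
  by_contra hne
  rcases List.prefix_or_prefix_of_prefix hp hp' with hpp | hpp
  · exact word_facts.2 wd h wd' h' hne hpp
  · exact word_facts.2 wd' h' wd h (fun e => hne e.symm) hpp

-- a word match at i excludes a digit character at i
lemma word_not_digit {num : String} {i : Nat} {wd : String × String}
    (h : wd ∈ wordList)
    (hp : wd.1.toList <+: num.toList.drop i) :
    PySem.Chars.isdigit (num.toList[i]?.getD ' ') = false := by
  obtain ⟨hne, hnd⟩ := word_facts.1 wd h
  cases hw : wd.1.toList with
  | nil => exact absurd hw hne
  | cons c rest =>
    rw [hw] at hp hnd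
    obtain ⟨t, ht⟩ := hp
    have hc : num.toList[i]? = some c := by
      rw [← List.head?_drop, ← ht]; rfl
    rw [hc]
    simpa using hnd

lemma find?_word_iff {t : List Char} {wd : String × String} :
    wordList.find? (fun wd => decide (wd.1.toList <+: t)) = some wd
    ↔ wd ∈ wordList ∧ wd.1.toList <+: t := by
  constructor
  · intro h
    exact ⟨List.mem_of_find?_eq_some h, by simpa using List.find?_some h⟩
  · rintro ⟨hm, hp⟩
    have hsome : (wordList.find? (fun wd => decide (wd.1.toList <+: t))).isSome :=
      List.find?_isSome.mpr ⟨wd, hm, by simpa⟩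
    obtain ⟨wd', hwd'⟩ := Option.isSome_iff_exists.mp hsome
    have heq := word_unique (List.mem_of_find?_eq_some hwd') hm
      (by simpa using List.find?_some hwd') hp
    rw [hwd', heq]

-- characterisation of the inner find-loop of B
lemma findAllFrom_eq (num : String) (wd : String × String) (hw : wd ∈ wordList) :
    ∀ (fuel start : Nat), start ≤ num.toList.length → num.toList.length - start < fuel →
    findAllFrom num wd.1 wd.2 fuel start
      = ((List.range' start (num.toList.length - start)).filter
          (fun i => decide (wd.1.toList <+: num.toList.drop i))).map
          (fun (i : Nat) => ((i : Int), wd.2)) := by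
  intro fuel
  induction fuel with
  | zero => intro start hs hf; omega
  | succ fuel ih =>
    intro start hs hf
    rw [findAllFrom]
    simp only [PySem.Str.findFrom_eq]
    by_cases hneg : PySem.Chars.findFrom num.toList wd.1.toList (start : Int) none = -1
    · rw [if_pos hneg]
      have hno : ¬ wd.1.toList <:+: num.toList.drop start :=
        (PySem.Chars.findFrom_natCast_eq_neg_one_iff _ _ start hs).mp hneg
      symm
      simp only [List.map_eq_nil_iff, List.filter_eq_nil_iff]
      intro i hi
      simp only [decide_eq_true_eq]
      intro hpref
      apply hno
      have hile : start ≤ i := (List.mem_range'_1.mp hi).1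
      have hdd : num.toList.drop i = (num.toList.drop start).drop (i - start) := by
        rw [List.drop_drop]; congr 1; omega
      rw [hdd] at hpref
      exact hpref.isInfix.trans (List.drop_suffix _ _).isInfix
    · rw [if_neg hneg]
      obtain ⟨hge, hpref, hmin⟩ :=
        PySem.Chars.findFrom_natCast_spec num.toList wd.1.toList start hs hneg
      set j := (PySem.Chars.findFrom num.toList wd.1.toList (start : Int) none).toNat with hj
      have hjI : PySem.Chars.findFrom num.toList wd.1.toList (start : Int) none = (j : Int) := by
        rw [hj, Int.toNat_of_nonneg (by omega)]
      have hjlt : j < num.toList.length := by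
        have hne := (word_facts.1 wd hw).1
        by_contra hge'
        rw [List.drop_of_length_le (by omega)] at hpref
        exact hne (List.prefix_nil.mp hpref)
      have hsj : start ≤ j := by omega
      rw [ih (j + 1) (by omega) (by omega)]
      have hsplit : List.range' start (num.toList.length - start)
          = List.range' start (j - start) ++ List.range' j (num.toList.length - j) := by
        have h := @List.range'_append start (j - start) (num.toList.length - j) 1
        rw [one_mul] at h
        rw [show start + (j - start) = j by omega] at h
        rw [show (j - start) + (num.toList.length - j) = num.toList.length - start by omega] at h
        exact h.symm
      rw [hsplit, List.filter_append, List.map_append]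
      have hfront : (List.range' start (j - start)).filter
          (fun i => decide (wd.1.toList <+: num.toList.drop i)) = [] := by
        rw [List.filter_eq_nil_iff]
        intro i hi
        simp only [decide_eq_true_eq]
        obtain ⟨h1, h2⟩ := List.mem_range'_1.mp hi
        exact hmin i h1 (by omega)
      rw [hfront, List.map_nil, List.nil_append]
      have htail : num.toList.length - j = (num.toList.length - (j + 1)) + 1 := by omega
      rw [htail, List.range'_succ, List.filter_cons, if_pos (by simpa using hpref),
        List.map_cons, hjI]

def dP (num : String) (i : Nat) : Option (Int × String) :=
  if PySem.Chars.isdigit (num.toList[i]?.getD ' ') then some ((i : Int), String.ofList [num.toList[i]?.getD ' ']) else none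

lemma B_digit_loop (num : String) : ∀ (m k : Nat) (acc : List (Int × String)),
    k + m = num.toList.length →
    (PySem.List.enumerate (num.toList.drop k) (k : Int)).foldl (fun acc p =>
      if PySem.Chars.isdigit p.2 then acc ++ [(p.1, String.ofList [p.2])] else acc) acc
    = acc ++ (List.range' k m).filterMap (dP num) := by
  intro m
  induction m with
  | zero =>
    intro k acc hk
    rw [List.drop_of_length_le (by omega)]
    simp [PySem.List.enumerate_nil]
  | succ m ih =>
    intro k acc hk
    have hklt : k < num.toList.length := by omega
    rw [List.drop_eq_getElem_cons hklt, PySem.List.enumerate_cons, List.foldl_cons]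
    have hcast : (k : Int) + 1 = ((k + 1 : Nat) : Int) := by push_cast; ring
    rw [hcast, ih (k + 1) _ (by omega), List.range'_succ, List.filterMap_cons]
    have hgetD : num.toList[k]?.getD ' ' = num.toList[k] := by
      rw [List.getElem?_eq_getElem hklt]; rfl
    by_cases hd : PySem.Chars.isdigit num.toList[k]
    · simp [dP, hgetD, hd]
    · simp [dP, hgetD, hd]

def evList (num : String) : List (Int × String) :=
  (List.range' 0 num.toList.length).filterMap (evP num)

def events2 (num : String) : List (Int × String) :=
  (wordList.flatMap (fun wd =>
      ((List.range' 0 num.toList.length).filter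
        (fun i => decide (wd.1.toList <+: num.toList.drop i))).map (fun (i : Nat) => ((i : Int), wd.2))))
  ++ (List.range' 0 num.toList.length).filterMap (dP num)

lemma B_events2 (num : String) :
    convert_to_digit_alt num
      = PySem.Str.join "" ((PySem.List.sorted (events2 num) (fun e => e.1) false).map (fun e => e.2)) := by
  simp only [convert_to_digit_alt]
  rw [PySem.List.foldl_append_eq_flatMap
    (fun wd => findAllFrom num wd.1 wd.2 (num.toList.length + 1) 0) wordList []]
  rw [List.nil_append]
  have hflat : wordList.flatMap (fun wd => findAllFrom num wd.1 wd.2 (num.toList.length + 1) 0)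
      = wordList.flatMap (fun wd =>
          ((List.range' 0 num.toList.length).filter
            (fun i => decide (wd.1.toList <+: num.toList.drop i))).map
            (fun (i : Nat) => ((i : Int), wd.2))) := by
    apply List.flatMap_congr
    intro wd hwd
    have h := findAllFrom_eq num wd hwd (num.toList.length + 1) 0 (by omega) (by omega)
    simpa using h
  rw [hflat]
  have hdig := B_digit_loop num num.toList.length 0
    (wordList.flatMap (fun wd =>
      ((List.range' 0 num.toList.length).filter
        (fun i => decide (wd.1.toList <+: num.toList.drop i))).map
        (fun (i : Nat) => ((i : Int), wd.2)))) (by omega)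
  rw [List.drop_zero, Nat.cast_zero] at hdig
  rw [hdig]
  rfl

lemma evP_fst {num : String} {i : Nat} {b : Int × String}
    (h : evP num i = some b) : b.1 = (i : Int) := by
  simp only [evP] at h
  cases hs : evS num i with
  | none => rw [hs] at h; simp at h
  | some t => rw [hs] at h; simp at h; rw [← h]

lemma evP_some_digit {num : String} {i : Nat}
    (hd : PySem.Chars.isdigit (num.toList[i]?.getD ' ') = true) :
    evP num i = some ((i : Int), String.ofList [num.toList[i]?.getD ' ']) := by
  simp only [evP, evS]
  rw [if_pos hd]
  rfl

lemma evP_some_word {num : String} {i : Nat} {wd : String × String}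
    (hw : wd ∈ wordList) (hp : wd.1.toList <+: num.toList.drop i) :
    evP num i = some ((i : Int), wd.2) := by
  have hd := word_not_digit hw hp
  simp only [evP, evS]
  rw [if_neg (by simp [hd])]
  rw [find?_word_iff.mpr ⟨hw, hp⟩]
  rfl

lemma mem_evList {num : String} {x : Int × String} :
    x ∈ evList num ↔ ∃ i : Nat, i < num.toList.length ∧ evP num i = some x := by
  simp only [evList, List.mem_filterMap, List.mem_range'_1]
  constructor
  · rintro ⟨i, ⟨_, hi⟩, hx⟩
    exact ⟨i, by omega, hx⟩
  · rintro ⟨i, hi, hx⟩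
    exact ⟨i, ⟨by omega, by omega⟩, hx⟩

lemma mem_events2 {num : String} {x : Int × String} :
    x ∈ events2 num ↔ x ∈ evList num := by
  rw [mem_evList]
  simp only [events2, List.mem_append, List.mem_flatMap, List.mem_map, List.mem_filter,
    List.mem_filterMap, List.mem_range'_1, decide_eq_true_eq]
  constructor
  · rintro (⟨wd, hwd, i, ⟨⟨_, hi⟩, hp⟩, hx⟩ | ⟨i, ⟨_, hi⟩, hx⟩)
    · refine ⟨i, by omega, ?_⟩
      rw [evP_some_word hwd hp, hx]
    · refine ⟨i, by omega, ?_⟩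
      simp only [dP] at hx
      by_cases hd : PySem.Chars.isdigit (num.toList[i]?.getD ' ') = true
      · rw [if_pos hd] at hx
        rw [evP_some_digit hd, hx]
      · rw [if_neg hd] at hx
        exact absurd hx (by simp)
  · rintro ⟨i, hi, hx⟩
    simp only [evP, evS] at hx
    by_cases hd : PySem.Chars.isdigit (num.toList[i]?.getD ' ') = true
    · right
      refine ⟨i, ⟨by omega, by omega⟩, ?_⟩
      rw [if_pos hd] at hx
      simp only [Option.map_some] at hx
      simp only [dP, if_pos hd]
      exact hx
    · left
      rw [if_neg hd] at hx
      cases hf : wordList.find? (fun wd => decide (wd.1.toList <+: num.toList.drop i)) with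
      | none => rw [hf] at hx; simp at hx
      | some wd =>
        rw [hf] at hx
        simp only [Option.map_some] at hx
        obtain ⟨hwm, hwp⟩ := find?_word_iff.mp hf
        exact ⟨wd, hwm, i, ⟨⟨by omega, by omega⟩, hwp⟩, by injection hx⟩

lemma dP_fst {num : String} {i : Nat} {b : Int × String}
    (h : dP num i = some b) : b.1 = (i : Int) := by
  simp only [dP] at h
  by_cases hd : PySem.Chars.isdigit (num.toList[i]?.getD ' ') = true
  · rw [if_pos hd] at h
    simp only [Option.some.injEq] at h
    rw [← h]
  · rw [if_neg hd] at h
    exact absurd h (by simp)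

lemma nodup_digitPart (num : String) :
    ((List.range' 0 num.toList.length).filterMap (dP num)).Nodup := by
  have hpw : ((List.range' 0 num.toList.length).filterMap (dP num)).Pairwise
      (fun a b => a.1 < b.1) := by
    rw [List.pairwise_filterMap]
    apply (List.pairwise_lt_range' 1).imp
    intro i j hij
    intro b hb b' hb'
    rw [dP_fst hb, dP_fst hb']
    exact_mod_cast hij
  apply hpw.imp
  intro a b hlt heq
  rw [heq] at hlt
  exact lt_irrefl _ hlt

lemma nodup_events2 (num : String) : (events2 num).Nodup := by
  apply List.Nodup.append
  · rw [List.nodup_flatMap]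
    constructor
    · intro wd _
      apply List.Nodup.map
      · intro a b hab
        simpa using congrArg Prod.fst hab
      · exact (List.nodup_range' 1).filter _
    · have hpw : wordList.Pairwise (fun a b => a.2 ≠ b.2) := by decide
      apply hpw.imp
      intro a b hne
      intro x hxa hxb
      simp only [List.mem_map] at hxa hxb
      obtain ⟨i, _, hi⟩ := hxa
      obtain ⟨j, _, hj⟩ := hxb
      apply hne
      rw [← hi] at hj
      simpa using (congrArg Prod.snd hj).symm
  · exact nodup_digitPart num
  · intro x hxa hxb
    simp only [List.mem_flatMap, List.mem_map, List.mem_filter, List.mem_range'_1,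
      decide_eq_true_eq] at hxa
    obtain ⟨wd, hwd, i, ⟨_, hp⟩, hx⟩ := hxa
    simp only [List.mem_filterMap, List.mem_range'_1] at hxb
    obtain ⟨j, _, hj⟩ := hxb
    have hji : (j : Int) = (i : Int) := by
      rw [← dP_fst hj, ← hx]
    have hij : j = i := by exact_mod_cast hji
    subst hij
    simp only [dP] at hj
    rw [word_not_digit hwd hp] at hj
    simp at hj

lemma pairwise_evList (num : String) :
    (evList num).Pairwise (fun a b => a.1 < b.1) := by
  rw [evList, List.pairwise_filterMap]
  apply (List.pairwise_lt_range' 1).imp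
  intro i j hij
  intro b hb b' hb'
  rw [evP_fst hb, evP_fst hb']
  exact_mod_cast hij

lemma nodup_evList (num : String) : (evList num).Nodup := by
  apply (pairwise_evList num).imp
  intro a b hlt heq
  rw [heq] at hlt
  exact lt_irrefl _ hlt

lemma sorted_events2 (num : String) :
    PySem.List.sorted (events2 num) (fun e => e.1) false = evList num := by
  apply PySem.List.sorted_eq_of_perm_of_pairwise_lt
  · exact (List.perm_ext_iff_of_nodup (nodup_evList num) (nodup_events2 num)).mpr
      (fun a => mem_events2.symm)
  · exact pairwise_evList num

-- ===== VERDICT (by name: the statement is the Claim_ definition above) =====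
theorem convert_to_digit_spec : Claim_equal_convert_to_digit := by
  intro num _
  show convert_to_digit num = convert_to_digit_alt num
  rw [A_result, B_events2, sorted_events2]
  congr 1
  rw [evList]
  rw [List.map_filterMap]
  apply List.filterMap_congr
  intro i _
  simp [evP, Option.map_map]
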